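-- pv_equiv track=rewrite | github.com/Jansevska/w8d2 | whiteboard/whiteboard.py | solution
-- ===== SOURCE A (Python) =====
-- def solution(arr):
--     lucky=[]
--     for n in arr:
--         if arr.count(n)==n:
--             lucky.append(n)
--     if lucky:
--         return max(lucky)
--     return -1
-- ===== SOURCE B (Python) =====
-- def solution(arr):
--     s = sorted(arr)
--     best = -1
--     i = 0
--     n = len(s)
--     while i < n:
--         v = s[i]
--         j = i + 1
--         while j < n and s[j] == v:
--             j += 1
--         if j - i == v and best < v:
--             best = v
--         i = j
--     return best
-- ===== Notes on version B (the rewrite author's own statement) =====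
-- stated objective: faster
-- what changed: Replaces A's per-element arr.count scans (quadratic) with sort-then-single-ordered-pass: walk sorted(arr) once, measure each maximal run of equal values, and keep the largest value whose run length equals itself.
import Mathlib
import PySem

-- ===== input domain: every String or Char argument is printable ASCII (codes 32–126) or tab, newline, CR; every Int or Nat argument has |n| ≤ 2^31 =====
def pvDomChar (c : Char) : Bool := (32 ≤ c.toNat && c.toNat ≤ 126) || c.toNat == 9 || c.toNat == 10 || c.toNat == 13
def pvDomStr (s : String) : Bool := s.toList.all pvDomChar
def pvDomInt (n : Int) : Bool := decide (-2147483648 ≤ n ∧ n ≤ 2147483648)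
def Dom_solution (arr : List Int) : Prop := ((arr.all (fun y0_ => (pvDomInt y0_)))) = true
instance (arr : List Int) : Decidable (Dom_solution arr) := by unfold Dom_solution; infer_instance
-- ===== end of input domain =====

-- B sorts the list and makes one ordered pass over maximal runs of equal values
-- (run length = count), keeping the largest value whose run length equals itself
-- instead of A's per-element arr.count scans (objective: faster).


-- ===== PORT A =====
-- lucky is built by the loop, then 'max(lucky)' if nonempty else -1
def solution (arr : List Int) : Int :=
  match PySem.List.max?
      (arr.foldl (fun acc n => if (PySem.List.count arr n : Int) = n then acc ++ [n] else acc) [])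
      (fun x => x) with
  | some m => m
  | none => -1

-- ===== PORT B =====
-- the outer while loop of Source B: at position i take the maximal run of s[i],
-- 'j - i' is 1 + length of the equal tail, then continue at j with the updated best
def runScan (s : List Int) (best : Int) : Int :=
  match s with
  | [] => best
  | v :: t =>
      let run : Int := 1 + (t.takeWhile (fun x => x == v)).length
      runScan (t.dropWhile (fun x => x == v)) (if run = v ∧ best < v then v else best)
termination_by s.length
decreasing_by
  simp only [List.length_cons]
  exact Nat.lt_succ_of_le (List.length_dropWhile_le _ _)

def solution_alt (arr : List Int) : Int :=
  runScan (PySem.List.sorted arr (fun x => x) false) (-1)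

-- ===== PRECONDITION & SPEC =====
def Spec_solution (arr : List Int) (out : Int) : Prop := out = solution_alt arr
instance (arr : List Int) (out : Int) : Decidable (Spec_solution arr out) := by unfold Spec_solution; infer_instance

-- ===== CLAIM (what is proved, stated in full; the proofs are below) =====
def Claim_equal_solution : Prop := ∀ (arr : List Int), Dom_solution arr → Spec_solution arr (solution arr)

-- ===== LEMMAS AND PROOFS =====

-- the characterising property of the answer: -1 with no lucky number, or the largest lucky number
def IsAns (arr : List Int) (r : Int) : Prop :=
  (r = -1 ∧ ∀ n ∈ arr, (arr.count n : Int) ≠ n) ∨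
  (r ∈ arr ∧ (arr.count r : Int) = r ∧ ∀ n ∈ arr, (arr.count n : Int) = n → n ≤ r)

theorem isAns_unique (arr : List Int) (a b : Int) (ha : IsAns arr a) (hb : IsAns arr b) : a = b := by
  rcases ha with ⟨ha1, ha2⟩ | ⟨ha1, ha2, ha3⟩ <;> rcases hb with ⟨hb1, hb2⟩ | ⟨hb1, hb2, hb3⟩
  · omega
  · exact absurd hb2 (ha2 b hb1)
  · exact absurd ha2 (hb2 a ha1)
  · exact le_antisymm (hb3 a ha1 ha2) (ha3 b hb1 hb2)

theorem solution_isAns (arr : List Int) : IsAns arr (solution arr) := by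
  unfold solution
  have hl : arr.foldl (fun acc n => if (PySem.List.count arr n : Int) = n then acc ++ [n] else acc) [] =
      arr.filter (fun n => decide ((arr.count n : Int) = n)) := by
    rw [PySem.List.foldl_append_ite_eq_filter]
    simp only [PySem.List.count_eq, List.nil_append]
    rfl
  rw [hl]
  rcases h : PySem.List.max? (arr.filter fun n => decide ((arr.count n : Int) = n)) (fun x => x) with _ | m
  · left
    rw [PySem.List.max?_eq_none_iff] at h
    refine ⟨rfl, fun n hn hc => ?_⟩
    have : n ∈ arr.filter (fun n => decide ((arr.count n : Int) = n)) := by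
      simp [List.mem_filter, hn, hc]
    simp [h] at this
  · right
    have hm := PySem.List.max?_mem h
    have hmax := PySem.List.max?_isMax h
    simp only [List.mem_filter, decide_eq_true_eq] at hm
    refine ⟨hm.1, hm.2, fun n hn hc => ?_⟩
    exact hmax n (by simp [List.mem_filter, hn, hc])

-- invariant of B's run scan over a sorted list
theorem runScan_inv (s : List Int) (hs : s.Pairwise (· ≤ ·)) (b : Int) :
    (runScan s b = b ∨ (runScan s b ∈ s ∧ (s.count (runScan s b) : Int) = runScan s b)) ∧
    b ≤ runScan s b ∧
    ∀ v ∈ s, (s.count v : Int) = v → v ≤ runScan s b := by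
  induction hn : s.length using Nat.strong_induction_on generalizing s b with
  | _ N ih =>
  match s, hs with
  | [], _ => simp [runScan]
  | v :: t, hs =>
    subst hn
    set tw := t.takeWhile (fun x => x == v) with htw
    set rest := t.dropWhile (fun x => x == v) with hrest
    have hsplit : t = tw ++ rest := (List.takeWhile_append_dropWhile).symm
    have htwv : ∀ x ∈ tw, x = v := by
      intro x hx
      have := List.mem_takeWhile_imp hx
      simpa using this
    have hvle : ∀ x ∈ t, v ≤ x := (List.pairwise_cons.mp hs).1
    have hrestlt : ∀ x ∈ rest, v < x := by
      intro x hx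
      rcases hr : rest with _ | ⟨h0, r⟩
      · simp [hr] at hx
      · have hh0 : ¬ (h0 == v) = true := by
          have := List.head?_dropWhile_not (fun x => x == v) t
          rw [← hrest, hr] at this
          simpa using this
        have hh0v : v < h0 := by
          have : v ≤ h0 := hvle h0 (by rw [hsplit, hr]; simp)
          have : h0 ≠ v := by simpa using hh0
          omega
        rw [hr] at hx
        rcases List.mem_cons.mp hx with rfl | hx
        · exact hh0v
        · have hrp : (h0 :: r).Pairwise (· ≤ ·) := by
            have : rest.Sublist t := List.dropWhile_sublist _
            exact List.Pairwise.sublist (by rw [← hr, hrest]; exact (List.dropWhile_sublist _).cons _) hs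
          have := (List.pairwise_cons.mp hrp).1 x hx
          omega
    have hvnrest : v ∉ rest := fun hv => absurd (hrestlt v hv) (lt_irrefl v)
    have hcntv : ((v :: t).count v : Int) = 1 + (tw.length : Int) := by
      have h1 : tw.count v = tw.length := List.count_eq_length.mpr (by intro b hb; simpa using (htwv b hb).symm)
      have h2 : rest.count v = 0 := List.count_eq_zero.mpr hvnrest
      rw [hsplit]
      simp [List.count_append, h1, h2]
      omega
    have hcntrest : ∀ w ∈ rest, (v :: t).count w = rest.count w := by
      intro w hw
      have hwv : w ≠ v := by have := hrestlt w hw; omega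
      have h1 : tw.count w = 0 := List.count_eq_zero.mpr (fun hm => hwv (htwv w hm))
      rw [hsplit]
      have hvw : (v == w) = false := by simpa using fun h => hwv h.symm
      simp [List.count_cons, List.count_append, h1, hvw]
    have hrests : rest.Pairwise (· ≤ ·) :=
      List.Pairwise.sublist ((List.dropWhile_sublist _).cons _) hs
    have hrlen : rest.length < (v :: t).length :=
      Nat.lt_succ_of_le (List.length_dropWhile_le _ _)
    have hrun : runScan (v :: t) b =
        runScan rest (if (1 + (tw.length : Int)) = v ∧ b < v then v else b) := by
      rw [runScan]
    set b' : Int := if (1 + (tw.length : Int)) = v ∧ b < v then v else b with hb'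
    obtain ⟨i1, i2, i3⟩ := ih rest.length hrlen rest hrests b' rfl
    have hbb' : b ≤ b' := by rw [hb']; split <;> omega
    rw [hrun]
    refine ⟨?_, le_trans hbb' i2, ?_⟩
    · rcases i1 with e | ⟨m, hc⟩
      · rw [e, hb']
        split
        · rename_i hcond
          right
          refine ⟨List.mem_cons_self, ?_⟩
          rw [hcntv]; omega
        · exact Or.inl rfl
      · right
        refine ⟨?_, ?_⟩
        · rw [hsplit]; exact List.mem_cons_of_mem _ (List.mem_append_right _ m)
        · rw [hcntrest _ m]; exact hc
    · intro w hw hcw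
      rcases List.mem_cons.mp hw with rfl | hw
      · -- w = v
        rw [hcntv] at hcw
        have hvb' : w ≤ b' := by
          rw [hb']
          split
          · omega
          · rename_i hcond
            push Not at hcond
            have := hcond hcw
            omega
        exact le_trans hvb' i2
      · rw [hsplit] at hw
        rcases List.mem_append.mp hw with hw | hw
      -- w ∈ tw: w = v, same as head case
        · have hwv := htwv w hw
          subst hwv
          rw [hcntv] at hcw
          have hvb' : w ≤ b' := by
            rw [hb']
            split
            · omega
            · rename_i hcond
              push Not at hcond
              have := hcond hcw
              omega
          exact le_trans hvb' i2
        · refine i3 w hw ?_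
          rw [← hcntrest _ hw]
          exact hcw

theorem solution_alt_isAns (arr : List Int) : IsAns arr (solution_alt arr) := by
  unfold solution_alt
  set s := PySem.List.sorted arr (fun x => x) false with hsdef
  have hperm : s.Perm arr := PySem.List.sorted_perm arr (fun x => x) false
  have hpw : s.Pairwise (· ≤ ·) := by
    have := PySem.List.sorted_pairwise arr (fun x => x)
    simpa using this
  obtain ⟨i1, i2, i3⟩ := runScan_inv s hpw (-1)
  have hcnt : ∀ v, s.count v = arr.count v := fun v => hperm.count_eq v
  have hmem : ∀ v, v ∈ s ↔ v ∈ arr := fun v => hperm.mem_iff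
  rcases i1 with e | ⟨m, hc⟩
  · rw [e] at i3 ⊢
    left
    refine ⟨rfl, fun n hn hcn => ?_⟩
    have h1 : (1 : Int) ≤ n := by
      have := List.count_pos_iff.mpr hn
      omega
    have := i3 n ((hmem n).mpr hn) (by rw [hcnt]; exact hcn)
    omega
  · right
    exact ⟨(hmem _).mp m, by rw [← hcnt]; exact hc,
      fun n hn hcn => i3 n ((hmem n).mpr hn) (by rw [hcnt]; exact hcn)⟩

-- ===== VERDICT (by name: the statement is the Claim_ definition above) =====
theorem solution_spec : Claim_equal_solution := by
  intro arr _
  exact isAns_unique arr _ _ (solution_isAns arr) (solution_alt_isAns arr)
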